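-- pv_equiv track=rewrite | github.com/StanislavOkopnyi/python-project-50 | gendiff/json_file_parser.py | _parse
-- ===== SOURCE A (Python) =====
-- from itertools import product
--
-- def _parse(dict1: dict, dict2: dict) -> list[tuple]:
--     set1 = dict1.items()
--     set2 = dict2.items()
--
--     result = []
--     # Хотел сделать через set1 & set2 и т.д., но не работает, если
--     # в JSON находится array
--
--     for key_value1, key_value2 in product(set1, set2):
--         key1, key2 = key_value1[0], key_value2[0]
--         value1, value2 = key_value1[1], key_value2[1]
--         if key1 == key2:
--
--             if value1 == value2:
--                 result.append(("    " + key1, value1))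
--             elif value1 != value2:
--                 result.append(("  - " + key1, value1))
--                 result.append(("  + " + key2, value2))
--
--     keys1, keys2 = dict1.keys(), dict2.keys()
--
--     for key1 in keys1:
--         if key1 not in keys2:
--             result.append(("  - " + key1, dict1[key1]))
--
--     for key2 in keys2:
--         if key2 not in keys1:
--             result.append(("  + " + key2, dict2[key2]))
--
--     # В результате этой сортировки имена располагаются в алфавитном порядке
--     # В случае если встречается два имени, то имя с "-", оказывается выше
--     # имени с "+"
--     result.sort(key=lambda x: x[0][2], reverse=True)
--     result.sort(key=lambda x: x[0][4:])
--     return result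
-- ===== SOURCE B (Python) =====
-- def _parse(dict1: dict, dict2: dict) -> list[tuple]:
--     result = []
--     for key in sorted(set(dict1) | set(dict2)):
--         if key in dict1 and key in dict2:
--             value1, value2 = dict1[key], dict2[key]
--             if value1 == value2:
--                 result.append(("    " + key, value1))
--             else:
--                 result.append(("  - " + key, value1))
--                 result.append(("  + " + key, value2))
--         elif key in dict1:
--             result.append(("  - " + key, dict1[key]))
--         else:
--             result.append(("  + " + key, dict2[key]))
--     return result
-- ===== Notes on version B (the rewrite author's own statement) =====
-- stated objective: faster
-- what changed: A compares every dict1 item against every dict2 item (itertools.product), rescans both key views for removed/added keys, and then runs two stable sorts on the collected entries; B makes a single pass over the sorted union of the keys with direct dict membership tests and lookups, emitting the annotated entries already in final order.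
import Mathlib
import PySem

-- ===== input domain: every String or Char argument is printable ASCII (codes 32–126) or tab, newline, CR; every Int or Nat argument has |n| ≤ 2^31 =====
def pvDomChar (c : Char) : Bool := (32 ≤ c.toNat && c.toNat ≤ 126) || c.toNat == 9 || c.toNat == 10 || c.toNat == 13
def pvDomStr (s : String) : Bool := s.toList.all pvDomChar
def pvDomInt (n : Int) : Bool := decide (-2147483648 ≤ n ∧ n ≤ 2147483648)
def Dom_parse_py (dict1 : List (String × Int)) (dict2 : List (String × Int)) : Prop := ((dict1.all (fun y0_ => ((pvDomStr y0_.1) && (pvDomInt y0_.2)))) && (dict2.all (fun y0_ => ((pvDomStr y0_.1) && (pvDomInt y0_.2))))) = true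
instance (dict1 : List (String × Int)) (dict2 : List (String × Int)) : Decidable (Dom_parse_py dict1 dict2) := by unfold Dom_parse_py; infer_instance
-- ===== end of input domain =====

-- B replaces A's cartesian-product scan over dict1.items() × dict2.items() followed by two stable
-- sorts of the result with a single pass over the sorted union of the keys using direct lookups.

-- Python's 'a + b' on strings, exact on every input (kept off Lean's opaque String.append)
def pvCat (a b : String) : String := String.ofList (a.toList ++ b.toList)

-- key=lambda x: x[0][2] — the annotation character; the ' ' default is unreachable (every first
-- component the programs sort carries a 4-character annotation prefix, so x[0][2] never raises)
def pvTagKey (x : String × Int) : Char := (PySem.Str.pyGet? x.1 2).getD ' '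

-- key=lambda x: x[0][4:] — the bare key behind the annotation prefix
def pvRestKey (x : String × Int) : String := PySem.Str.slice x.1 (some 4) none

-- Python dict lookup dict[k]; the 0 default is unreachable at every call site (k is always a key)
def pvDictGet (d : List (String × Int)) (k : String) : Int := (List.lookup k d).getD 0

def parse_py (dict1 : List (String × Int)) (dict2 : List (String × Int)) : List (String × Int) :=
  let result1 : List (String × Int) := dict1.foldl (fun acc kv1 =>
    dict2.foldl (fun acc kv2 =>
      if kv1.1 = kv2.1 then
        if kv1.2 = kv2.2 then acc ++ [(pvCat "    " kv1.1, kv1.2)]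
        else acc ++ [(pvCat "  - " kv1.1, kv1.2), (pvCat "  + " kv2.1, kv2.2)]
      else acc) acc) []
  let keys1 := dict1.map Prod.fst
  let keys2 := dict2.map Prod.fst
  let result2 := keys1.foldl (fun acc k1 =>
    if k1 ∈ keys2 then acc else acc ++ [(pvCat "  - " k1, pvDictGet dict1 k1)]) result1
  let result3 := keys2.foldl (fun acc k2 =>
    if k2 ∈ keys1 then acc else acc ++ [(pvCat "  + " k2, pvDictGet dict2 k2)]) result2
  let result4 := PySem.List.sorted result3 pvTagKey true
  PySem.List.sorted result4 pvRestKey false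

def parse_py_alt (dict1 : List (String × Int)) (dict2 : List (String × Int)) : List (String × Int) :=
  let keys := PySem.List.sorted
    (PySem.Set.ofList (dict1.map Prod.fst ++ dict2.map Prod.fst)) (fun k => k) false
  keys.foldl (fun acc k =>
    match List.lookup k dict1, List.lookup k dict2 with
    | some v1, some v2 =>
        if v1 = v2 then acc ++ [(pvCat "    " k, v1)]
        else acc ++ [(pvCat "  - " k, v1), (pvCat "  + " k, v2)]
    | some v1, none => acc ++ [(pvCat "  - " k, v1)]
    | none, some v2 => acc ++ [(pvCat "  + " k, v2)]
    | none, none => acc) []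

-- ===== PRECONDITION & SPEC =====
-- An association list with a repeated key does not encode a Python dict (the function's arguments
-- are dicts, whose keys are unique), so Pre_ restricts to the lists that do encode one.
def Pre_parse_py (dict1 : List (String × Int)) (dict2 : List (String × Int)) : Prop :=
  (dict1.map Prod.fst).Nodup ∧ (dict2.map Prod.fst).Nodup
instance (dict1 : List (String × Int)) (dict2 : List (String × Int)) : Decidable (Pre_parse_py dict1 dict2) := by unfold Pre_parse_py; infer_instance

def pvWitness_parse_py : (List (String × Int)) × (List (String × Int)) :=
  ([("a", 1), ("b", 2)], [("b", 3), ("c", 2)])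

def Spec_parse_py (dict1 : List (String × Int)) (dict2 : List (String × Int)) (out : List (String × Int)) : Prop := out = parse_py_alt dict1 dict2
instance (dict1 : List (String × Int)) (dict2 : List (String × Int)) (out : List (String × Int)) : Decidable (Spec_parse_py dict1 dict2 out) := by unfold Spec_parse_py; infer_instance

-- ===== CLAIM (what is proved, stated in full; the proofs are below) =====
def Claim_equal_parse_py : Prop := ∀ (dict1 : List (String × Int)) (dict2 : List (String × Int)), Dom_parse_py dict1 dict2 → Pre_parse_py dict1 dict2 → Spec_parse_py dict1 dict2 (parse_py dict1 dict2)

-- ===== LEMMAS AND PROOFS =====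

theorem pvTag_gen (t k : String) (v : Int) (c : Char) (ht : t.toList = [' ', ' ', c, ' ']) :
    pvTagKey (pvCat t k, v) = c := by
  simp only [pvTagKey, show ((2:Int)) = ((2:Nat):Int) from rfl, PySem.Str.pyGet?_natCast,
    pvCat, String.toList_ofList, ht]
  rfl
theorem pvRest_gen (t k : String) (v : Int) (ht : t.toList.length = 4) :
    pvRestKey (pvCat t k, v) = k := by
  have h : (pvRestKey (pvCat t k, v)).toList = k.toList := by
    simp [pvRestKey, pvCat, pysem, ht]
  have := congrArg String.ofList h
  simpa [String.ofList_toList] using this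
theorem pvLookup_eq (d : List (String × Int)) (h : (d.map Prod.fst).Nodup) (k : String) (v : Int)
    (hm : (k, v) ∈ d) : List.lookup k d = some v := by
  induction d with
  | nil => cases hm
  | cons a t ih =>
    rw [List.map_cons, List.nodup_cons] at h
    rcases List.mem_cons.1 hm with h' | hm'
    · cases h' ; simp [List.lookup]
    · have hk : k ≠ a.1 := by
        rintro rfl
        exact h.1 (List.mem_map.2 ⟨(a.1, v), hm', rfl⟩)
      have hb : (k == a.1) = false := by simpa using hk
      simp [List.lookup, hb, ih h.2 hm']

-- flatMap over map fst
theorem pvFlatMap_map {β : Type} (g : String → List β) (l : List (String × Int)) :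
    (l.map Prod.fst).flatMap g = l.flatMap (fun kv => g kv.1) := by
  induction l with
  | nil => rfl
  | cons a t ih => simp [ih]

theorem pvFlatMap_filter {α β : Type} (p : α → Bool) (h : α → List β) (l : List α) :
    l.flatMap (fun x => if p x then h x else []) = (l.filter p).flatMap h := by
  induction l with
  | nil => rfl
  | cons a t ih => by_cases hp : p a <;> simp [hp, ih]

-- pairwise over the flatMap of strictly increasing keys
theorem pvPairwise_flatMap (R : (String × Int) → (String × Int) → Prop)
    (ks : List String) (f : String → List (String × Int))
    (hks : ks.Pairwise (· < ·)) (hkey : ∀ k, ∀ e ∈ f k, pvRestKey e = k)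
    (hin : ∀ k, (f k).Pairwise R)
    (hlt : ∀ a b, pvRestKey a < pvRestKey b → R a b) : (ks.flatMap f).Pairwise R := by
  induction ks with
  | nil => simp
  | cons k t ih =>
    rw [List.flatMap_cons, List.pairwise_append]
    refine ⟨hin k, ih hks.of_cons, ?_⟩
    intro a ha b hb
    obtain ⟨k', hk', hbk'⟩ := List.mem_flatMap.1 hb
    apply hlt
    rw [hkey k a ha, hkey k' b hbk']
    exact (List.pairwise_cons.1 hks).1 k' hk'

def pvGrp (dict1 dict2 : List (String × Int)) (k : String) : List (String × Int) :=
  match List.lookup k dict1, List.lookup k dict2 with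
  | some v1, some v2 =>
      if v1 = v2 then [(pvCat "    " k, v1)]
      else [(pvCat "  - " k, v1), (pvCat "  + " k, v2)]
  | some v1, none => [(pvCat "  - " k, v1)]
  | none, some v2 => [(pvCat "  + " k, v2)]
  | none, none => []

def pvR (a b : String × Int) : Prop :=
  pvRestKey a < pvRestKey b ∨ (pvRestKey a = pvRestKey b ∧ pvTagKey b < pvTagKey a)

def pvBoth (d2 : List (String × Int)) (kv : String × Int) : List (String × Int) :=
  match List.lookup kv.1 d2 with
  | some v2 =>
      if kv.2 = v2 then [(pvCat "    " kv.1, kv.2)]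
      else [(pvCat "  - " kv.1, kv.2), (pvCat "  + " kv.1, v2)]
  | none => []

def pvOnly (tag : String) (ks : List String) (kv : String × Int) : List (String × Int) :=
  if kv.1 ∈ ks then [] else [(pvCat tag kv.1, kv.2)]

theorem pvB_eq_flatMap (d1 d2 : List (String × Int)) :
    parse_py_alt d1 d2 =
      (PySem.List.sorted (PySem.Set.ofList (d1.map Prod.fst ++ d2.map Prod.fst)) (fun k => k) false).flatMap
        (pvGrp d1 d2) := by
  unfold parse_py_alt
  rw [List.foldl_ext (g := fun acc k => acc ++ pvGrp d1 d2 k)]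
  · exact PySem.List.foldl_append_eq_flatMap _ _ _
  · intro acc k _
    unfold pvGrp
    cases List.lookup k d1 <;> cases List.lookup k d2 <;> (try simp) <;> split <;> simp

-- a key absent from d2 contributes nothing to the product loop
theorem pvNoMatch (kv1 : String × Int) (l : List (String × Int))
    (hl : kv1.1 ∉ l.map Prod.fst) (acc : List (String × Int)) :
    l.foldl (fun acc kv2 =>
      if kv1.1 = kv2.1 then
        if kv1.2 = kv2.2 then acc ++ [(pvCat "    " kv1.1, kv1.2)]
        else acc ++ [(pvCat "  - " kv1.1, kv1.2), (pvCat "  + " kv2.1, kv2.2)]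
      else acc) acc = acc := by
  induction l generalizing acc with
  | nil => rfl
  | cons b u ihu =>
    have hb : kv1.1 ≠ b.1 := by
      rintro hx
      exact hl (List.mem_map.2 ⟨b, by simp, hx.symm⟩)
    rw [List.foldl_cons, if_neg hb]
    exact ihu (fun hm => hl (by rw [List.map_cons]; exact List.mem_cons_of_mem _ hm)) acc

-- inner product loop over d2
theorem pvInner_eq (d2 : List (String × Int)) (h2 : (d2.map Prod.fst).Nodup)
    (kv1 : String × Int) (acc : List (String × Int)) :
    d2.foldl (fun acc kv2 =>
      if kv1.1 = kv2.1 then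
        if kv1.2 = kv2.2 then acc ++ [(pvCat "    " kv1.1, kv1.2)]
        else acc ++ [(pvCat "  - " kv1.1, kv1.2), (pvCat "  + " kv2.1, kv2.2)]
      else acc) acc = acc ++ pvBoth d2 kv1 := by
  induction d2 generalizing acc with
  | nil => simp [pvBoth]
  | cons a t ih =>
    rw [List.map_cons, List.nodup_cons] at h2
    by_cases he : kv1.1 = a.1
    · have hbeq : (kv1.1 == a.1) = true := by simpa using he
      rw [List.foldl_cons, if_pos he,
        pvNoMatch kv1 t (by rw [he]; exact h2.1), pvBoth, List.lookup, hbeq]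
      split <;> simp [he] <;> assumption
    · have hb : (kv1.1 == a.1) = false := by simpa using he
      simp only [List.foldl_cons, if_neg he]
      rw [ih h2.2 acc, pvBoth, pvBoth, List.lookup, hb]

theorem pvA_eq (d1 d2 : List (String × Int)) (h1 : (d1.map Prod.fst).Nodup)
    (h2 : (d2.map Prod.fst).Nodup) :
    parse_py d1 d2 =
      PySem.List.sorted
        (PySem.List.sorted
          (d1.flatMap (pvBoth d2) ++ d1.flatMap (pvOnly "  - " (d2.map Prod.fst))
            ++ d2.flatMap (pvOnly "  + " (d1.map Prod.fst)))
          pvTagKey true) pvRestKey false := by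
  unfold parse_py
  dsimp only
  rw [List.foldl_ext (g := fun acc kv1 => acc ++ pvBoth d2 kv1)
    (H := fun acc kv1 _ => pvInner_eq d2 h2 kv1 acc)]
  rw [PySem.List.foldl_append_eq_flatMap, List.nil_append]
  rw [List.foldl_ext (g := fun acc k =>
    acc ++ (if k ∈ d1.map Prod.fst then [] else [(pvCat "  + " k, pvDictGet d2 k)]))
    (H := by intro acc k _; split <;> simp_all)]
  rw [PySem.List.foldl_append_eq_flatMap, pvFlatMap_map]
  rw [List.foldl_ext (g := fun acc k =>
    acc ++ (if k ∈ d2.map Prod.fst then [] else [(pvCat "  - " k, pvDictGet d1 k)]))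
    (H := by intro acc k _; split <;> simp_all)]
  rw [PySem.List.foldl_append_eq_flatMap, pvFlatMap_map]
  have e1 : d1.flatMap (fun kv => if kv.1 ∈ d2.map Prod.fst then [] else [(pvCat "  - " kv.1, pvDictGet d1 kv.1)])
      = d1.flatMap (pvOnly "  - " (d2.map Prod.fst)) := by
    refine List.flatMap_congr ?_
    intro kv hkv
    have : pvDictGet d1 kv.1 = kv.2 := by
      rw [pvDictGet, pvLookup_eq d1 h1 kv.1 kv.2 hkv] ; rfl
    rw [this] ; rfl
  have e2 : d2.flatMap (fun kv => if kv.1 ∈ d1.map Prod.fst then [] else [(pvCat "  + " kv.1, pvDictGet d2 kv.1)])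
      = d2.flatMap (pvOnly "  + " (d1.map Prod.fst)) := by
    refine List.flatMap_congr ?_
    intro kv hkv
    have : pvDictGet d2 kv.1 = kv.2 := by
      rw [pvDictGet, pvLookup_eq d2 h2 kv.1 kv.2 hkv] ; rfl
    rw [this] ; rfl
  rw [e1, e2]

theorem pvMem_of_lookup (k : String) (v : Int) (d : List (String × Int)) (h : List.lookup k d = some v) : (k,v) ∈ d := by
  induction d with
  | nil => simp [List.lookup] at h
  | cons a t ih =>
    rw [List.lookup] at h
    by_cases hk : (k == a.1) = true
    · simp [hk] at h
      have hk' : k = a.1 := by simpa using hk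
      have : (k, v) = a := by rw [hk', ← h]
      rw [this]
      exact List.mem_cons_self
    · simp [hk] at h
      exact List.mem_cons_of_mem _ (ih h)

theorem pvLookup_none (k : String) (d : List (String × Int)) (h : k ∉ d.map Prod.fst) :
    List.lookup k d = none := by
  rw [List.lookup_eq_none_iff]
  intro p hp
  simpa using fun he => h (List.mem_map.2 ⟨p, hp, he.symm⟩)

theorem pvKeys_of_lookup (k : String) (v : Int) (d : List (String × Int))
    (h : List.lookup k d = some v) : k ∈ d.map Prod.fst :=
  List.mem_map.2 ⟨(k, v), pvMem_of_lookup k v d h, rfl⟩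

-- the strictly increasing key list B iterates over
def pvKeys (d1 d2 : List (String × Int)) : List String :=
  PySem.List.sorted (PySem.Set.ofList (d1.map Prod.fst ++ d2.map Prod.fst)) (fun k => k) false

theorem pvL_perm (d1 d2 : List (String × Int)) (h1 : (d1.map Prod.fst).Nodup)
    (h2 : (d2.map Prod.fst).Nodup) :
    ((pvKeys d1 d2).flatMap (pvGrp d1 d2)).Perm
      (d1.flatMap (pvBoth d2) ++ d1.flatMap (pvOnly "  - " (d2.map Prod.fst))
        ++ d2.flatMap (pvOnly "  + " (d1.map Prod.fst))) := by
  classical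
  set K1 := d1.map Prod.fst with hK1
  set K2 := d2.map Prod.fst with hK2
  have hkeysnd : (pvKeys d1 d2).Nodup :=
    (PySem.List.sorted_perm _ _ _).symm.nodup (PySem.Set.nodup_ofList _)
  have hfilnd : (K2.filter (fun k => decide (k ∉ K1))).Nodup := h2.filter _
  have hdisj : K1.Disjoint (K2.filter (fun k => decide (k ∉ K1))) := by
    intro x hx1 hx2
    have := (List.mem_filter.1 hx2).2
    simp at this
    exact this hx1
  have hkp : (pvKeys d1 d2).Perm (K1 ++ K2.filter (fun k => decide (k ∉ K1))) := by
    rw [List.perm_ext_iff_of_nodup hkeysnd (h1.append hfilnd hdisj)]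
    intro a
    simp [pvKeys, PySem.List.mem_sorted, PySem.Set.mem_ofList, List.mem_filter, hK1, hK2]
    tauto
  refine (List.Perm.flatMap_right (pvGrp d1 d2) hkp).trans ?_
  rw [List.flatMap_append]
  -- left block: keys of d1
  have hA : K1.flatMap (pvGrp d1 d2) =
      d1.flatMap (fun kv => pvBoth d2 kv ++ pvOnly "  - " K2 kv) := by
    rw [hK1, pvFlatMap_map]
    refine List.flatMap_congr ?_
    intro kv hkv
    have hl1 : List.lookup kv.1 d1 = some kv.2 := pvLookup_eq d1 h1 kv.1 kv.2 hkv
    cases hl2 : List.lookup kv.1 d2 with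
    | some v2 =>
      have hmem : kv.1 ∈ K2 := pvKeys_of_lookup kv.1 v2 d2 hl2
      rw [pvGrp, hl1, hl2, pvBoth, hl2, pvOnly, if_pos hmem, List.append_nil]
    | none =>
      have hmem : kv.1 ∉ K2 := by
        intro hm
        obtain ⟨p, hp, hpe⟩ := List.mem_map.1 hm
        have hp' : (kv.1, p.2) ∈ d2 := by rw [← hpe]; exact hp
        rw [pvLookup_eq d2 h2 kv.1 p.2 hp'] at hl2
        simp at hl2
      rw [pvGrp, hl1, hl2, pvBoth, hl2, pvOnly, if_neg hmem, List.nil_append]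
  -- right block: keys of d2 not in d1
  have hB : (K2.filter (fun k => decide (k ∉ K1))).flatMap (pvGrp d1 d2) =
      d2.flatMap (pvOnly "  + " K1) := by
    have hOnly : pvOnly "  + " K1 =
        (fun kv : String × Int => if decide (kv.1 ∉ K1) then [(pvCat "  + " kv.1, kv.2)] else []) := by
      funext kv
      by_cases hm : kv.1 ∈ K1 <;> simp [pvOnly, hm]
    conv_rhs => rw [show pvOnly "  + " K1 = (fun kv : String × Int => if decide (kv.1 ∉ K1) then [(pvCat "  + " kv.1, kv.2)] else []) from hOnly, pvFlatMap_filter]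
    rw [hK2, List.filter_map, pvFlatMap_map]
    refine List.flatMap_congr ?_
    intro kv hkv
    have hkv2 : kv ∈ d2 := (List.mem_filter.1 hkv).1
    have hnk1 : kv.1 ∉ K1 := by
      have := (List.mem_filter.1 hkv).2
      simpa using this
    have hl1 : List.lookup kv.1 d1 = none := pvLookup_none kv.1 d1 hnk1
    have hl2 : List.lookup kv.1 d2 = some kv.2 := pvLookup_eq d2 h2 kv.1 kv.2 hkv2
    rw [pvGrp, hl1, hl2]
  rw [hA, hB]
  exact ((List.flatMap_append_perm d1 (pvBoth d2) (pvOnly "  - " K2)).symm).append_right _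

theorem pvInsertBy_split {α : Type} (bf : α → α → Bool) (x : α) (A B : List α)
    (hA : ∀ y ∈ A, bf x y = false) (hB : ∀ b, B.head? = some b → bf x b = true) :
    PySem.List.insertBy bf x (A ++ B) = A ++ x :: B := by
  induction A with
  | nil =>
    cases B with
    | nil => rfl
    | cons b B' => simp [PySem.List.insertBy, hB b rfl]
  | cons a A' ih =>
    have ha : bf x a = false := hA a (by simp)
    simp only [List.cons_append, PySem.List.insertBy, ha]
    simp [ih (fun y hy => hA y (by simp [hy]))]

theorem pvStab {α κ₁ κ₂ : Type} [LinearOrder κ₁] [LinearOrder κ₂] (k1 : α → κ₁) (k2 : α → κ₂)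
    (M ys : List α) (hM : M.Pairwise (fun a b => k1 b ≤ k1 a)) (hp : ys.Perm M)
    (hys : ys.Pairwise (fun a b => k2 a < k2 b ∨ (k2 a = k2 b ∧ k1 b < k1 a))) :
    PySem.List.sorted M k2 false = ys := by
  induction M using List.reverseRecOn generalizing ys with
  | nil => rw [hp.eq_nil]; rfl
  | append_singleton M' x ih =>
    have hx : x ∈ ys := hp.mem_iff.2 (by simp)
    obtain ⟨A, B, rfl⟩ := List.append_of_mem hx
    -- (A ++ B).Perm M'
    have hp' : (A ++ B).Perm M' := by
      have h1 : (A ++ x :: B).Perm (x :: (A ++ B)) := List.perm_middle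
      have h2 : (M' ++ [x]).Perm (x :: M') := by
        exact List.perm_append_comm
      exact ((h1.symm.trans hp).trans h2).cons_inv
    have hMsub : M'.Pairwise (fun a b => k1 b ≤ k1 a) := (List.pairwise_append.1 hM).1
    have hx_min : ∀ y ∈ M', k1 x ≤ k1 y := by
      intro y hy
      exact (List.pairwise_append.1 hM).2.2 y hy x (by simp)
    have hysub : (A ++ B).Pairwise (fun a b => k2 a < k2 b ∨ (k2 a = k2 b ∧ k1 b < k1 a)) := by
      refine hys.sublist ?_
      exact (List.sublist_cons_self x B).append_left A
    have ihe : PySem.List.sorted M' k2 false = A ++ B := ih _ hMsub hp' hysub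
    rw [PySem.List.sorted_eq_foldl_insertBy, List.foldl_append, ← PySem.List.sorted_eq_foldl_insertBy, ihe]
    simp only [List.foldl_cons, List.foldl_nil]
    refine pvInsertBy_split _ x A B ?_ ?_
    · intro y hy
      have hR := (List.pairwise_append.1 hys).2.2 y hy x (by simp)
      rcases hR with h | ⟨he, _⟩
      · simp [not_lt.2 (le_of_lt h)]
      · simp [he]
    · intro b hb
      have hbB : b ∈ B := List.mem_of_mem_head? hb
      have hR : k2 x < k2 b ∨ (k2 x = k2 b ∧ k1 b < k1 x) := by
        have := (List.pairwise_cons.1 (List.pairwise_append.1 hys).2.1).1 b hbB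
        exact this
      rcases hR with h | ⟨_, hlt⟩
      · simp [h]
      · exfalso
        have hbM' : b ∈ M' := hp'.subset (by simp [hbB])
        exact absurd (hx_min b hbM') (not_le.2 hlt)

theorem pvGrp_restKey (d1 d2 : List (String × Int)) (k : String) :
    ∀ e ∈ pvGrp d1 d2 k, pvRestKey e = k := by
  intro e he
  rcases hA : List.lookup k d1 with _ | v1 <;> rcases hB : List.lookup k d2 with _ | v2 <;>
    simp only [pvGrp, hA, hB] at he
  · exact absurd he (List.not_mem_nil)
  · rw [List.mem_singleton.1 he]; exact pvRest_gen _ k _ (by decide)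
  · rw [List.mem_singleton.1 he]; exact pvRest_gen _ k _ (by decide)
  · split at he
    · rw [List.mem_singleton.1 he]; exact pvRest_gen _ k _ (by decide)
    · rcases List.mem_cons.1 he with he | he
      · rw [he]; exact pvRest_gen _ k _ (by decide)
      · rw [List.mem_singleton.1 he]; exact pvRest_gen _ k _ (by decide)

theorem pvGrp_pairwise (d1 d2 : List (String × Int)) (k : String) :
    (pvGrp d1 d2 k).Pairwise pvR := by
  rcases hA : List.lookup k d1 with _ | v1 <;> rcases hB : List.lookup k d2 with _ | v2 <;>
    simp only [pvGrp, hA, hB]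
  · simp
  · simp
  · simp
  · split
    · simp
    · refine List.pairwise_cons.2 ⟨?_, by simp⟩
      intro b hb
      rcases List.mem_singleton.1 hb with rfl
      refine Or.inr ⟨?_, ?_⟩
      · rw [pvRest_gen _ k _ (by decide), pvRest_gen _ k _ (by decide)]
      · rw [pvTag_gen _ k _ '+' (by decide), pvTag_gen _ k _ '-' (by decide)]
        decide

theorem pvL_pairwise (d1 d2 : List (String × Int)) :
    ((pvKeys d1 d2).flatMap (pvGrp d1 d2)).Pairwise pvR := by
  refine pvPairwise_flatMap pvR _ _ (PySem.List.sorted_ofList_pairwise_lt _)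
    (pvGrp_restKey d1 d2) (pvGrp_pairwise d1 d2) (fun a b h => Or.inl h)

theorem pv_final (d1 d2 : List (String × Int)) (h1 : (d1.map Prod.fst).Nodup)
    (h2 : (d2.map Prod.fst).Nodup) : parse_py d1 d2 = parse_py_alt d1 d2 := by
  rw [pvA_eq d1 d2 h1 h2, pvB_eq_flatMap d1 d2]
  exact pvStab pvTagKey pvRestKey _ _ (PySem.List.sorted_pairwise_rev _ _)
    ((pvL_perm d1 d2 h1 h2).trans (PySem.List.sorted_perm _ _ _).symm)
    (pvL_pairwise d1 d2)

-- ===== VERDICT (by name: the statement is the Claim_ definition above) =====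
theorem parse_py_spec : Claim_equal_parse_py := by
  intro dict1 dict2 _ hpre
  exact pv_final dict1 dict2 hpre.1 hpre.2
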